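-- pv_equiv track=rewrite | github.com/jingxie9816/CS61A | HW/hw02/hw02.py | missing_digits
-- ===== SOURCE A (Python) =====
-- def missing_digits(n):
--     """Given a number a that is in sorted, increasing order,
--     return the number of missing digits in n. A missing digit is
--     a number between the first and last digit of a that is not in n.
--     >>> missing_digits(1248) # 3, 5, 6, 7
--     4
--     >>> missing_digits(1122) # No missing numbers
--     0
--     >>> missing_digits(123456) # No missing numbers
--     0
--     >>> missing_digits(3558) # 4, 6, 7
--     3
--     >>> missing_digits(35578) # 4, 6
--     2
--     >>> missing_digits(12456) # 3
--     1
--     >>> missing_digits(16789) # 2, 3, 4, 5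
--     4
--     >>> missing_digits(19) # 2, 3, 4, 5, 6, 7, 8
--     7
--     >>> missing_digits(4) # No missing numbers between 4 and 4
--     0
--     >>> from construct_check import check
--     >>> # ban while or for loops
--     >>> check(HW_SOURCE_FILE, 'missing_digits', ['While', 'For'])
--     True
--     """
--     "*** YOUR CODE HERE ***"
--     if n < 10:
--         return 0
--     else:
--         all_but_last, last = n // 10, n % 10
--         all_but_second_last, second_last = all_but_last // 10, all_but_last % 10
--         if last == second_last or last == second_last + 1:
--             return missing_digits(all_but_last)
--         else:
--             return missing_digits(all_but_last) + last - second_last - 1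
-- ===== SOURCE B (Python) =====
-- def missing_digits(n):
--     if n < 10:
--         return 0
--     ds = [int(c) for c in str(n)]
--     return (ds[-1] - ds[0]) - (len(ds) - 1) + sum(1 for a, b in zip(ds, ds[1:]) if a == b)
-- ===== Notes on version B (the rewrite author's own statement) =====
-- stated objective: alternative
-- what changed: Replaces the per-digit-pair recursive gap accumulation with a non-recursive closed form on the decimal string: the telescoped gap sum (last digit - first digit - (len-1)) plus one count of equal adjacent digit pairs.
import Mathlib
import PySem

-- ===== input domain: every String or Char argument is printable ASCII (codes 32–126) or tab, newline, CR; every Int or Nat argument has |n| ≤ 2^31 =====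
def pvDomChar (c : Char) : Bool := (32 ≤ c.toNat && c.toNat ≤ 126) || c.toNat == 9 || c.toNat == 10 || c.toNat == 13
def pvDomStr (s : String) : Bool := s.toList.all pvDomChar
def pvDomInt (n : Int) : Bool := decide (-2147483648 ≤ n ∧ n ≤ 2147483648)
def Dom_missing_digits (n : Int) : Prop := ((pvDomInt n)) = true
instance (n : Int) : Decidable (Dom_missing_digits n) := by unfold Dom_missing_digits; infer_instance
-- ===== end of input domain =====

-- B replaces A's per-pair recursive gap accumulation by a closed form on the decimal
-- digit string: (last digit - first digit) - (number of pairs) + count of equal adjacent pairs.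


-- ===== PORT A =====
def missing_digits (n : Int) : Int :=
  if n < 10 then 0
  else
    let all_but_last := PySem.Int.floordiv n 10
    let last := PySem.Int.mod n 10
    -- A also computes all_but_second_last (= all_but_last // 10) but never uses it
    let second_last := PySem.Int.mod all_but_last 10
    if last == second_last || last == second_last + 1 then
      missing_digits all_but_last
    else
      missing_digits all_but_last + last - second_last - 1
termination_by n.toNat
decreasing_by
  all_goals
    rw [PySem.Int.floordiv_eq_ediv_of_pos (by omega)]
    omega

-- ===== PORT B =====
-- int(c) on the single digit characters of str(n) (n ≥ 10 here) is exactly c.toNat - 48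
def missing_digits_alt (n : Int) : Int :=
  if n < 10 then 0
  else
    let ds : List Int := (PySem.Int.toChars n).map (fun c => ((c.toNat : Int) - 48))
    (PySem.List.pyGetD ds (-1) 0 - PySem.List.pyGetD ds 0 0) - (PySem.List.len ds - 1) +
      (ds.zip (PySem.List.slice ds (some 1) none)).foldl
        (fun acc p => if p.1 == p.2 then acc + 1 else acc) 0

-- ===== PRECONDITION & SPEC =====
def Spec_missing_digits (n : Int) (out : Int) : Prop := out = missing_digits_alt n
instance (n : Int) (out : Int) : Decidable (Spec_missing_digits n out) := by unfold Spec_missing_digits; infer_instance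

-- ===== CLAIM (what is proved, stated in full; the proofs are below) =====
def Claim_equal_missing_digits : Prop := ∀ (n : Int), Dom_missing_digits n → Spec_missing_digits n (missing_digits n)

-- ===== LEMMAS AND PROOFS =====

-- digit values of str(n) (used for nonnegative n)
def dlist (n : Int) : List Int := (PySem.Int.toChars n).map (fun c => ((c.toNat : Int) - 48))

-- A's total contribution, expressed structurally over adjacent digit pairs
def pairSum : List Int → Int
  | [] => 0
  | [_] => 0
  | a :: b :: t => (b - a - 1) + (if b = a then 1 else 0) + pairSum (b :: t)

lemma toDigitsCore_shift (b : Nat) : ∀ (f n : Nat) (l : List Char),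
    Nat.toDigitsCore b f n l = Nat.toDigitsCore b f n [] ++ l := by
  intro f
  induction f with
  | zero => intro n l; simp [Nat.toDigitsCore]
  | succ f ih =>
    intro n l
    simp only [Nat.toDigitsCore]
    by_cases hx : n / b = 0
    · simp [hx]
    · simp only [hx, if_false]
      rw [ih (n / b) (Nat.digitChar (n % b) :: l), ih (n / b) [Nat.digitChar (n % b)]]
      simp

lemma toDigitsCore_fuel (b : Nat) (hb : 2 ≤ b) : ∀ (n f : Nat), n < f →
    Nat.toDigitsCore b f n [] = Nat.toDigits b n := by
  intro n
  induction n using Nat.strong_induction_on with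
  | _ n ih =>
    intro f hf
    cases f with
    | zero => omega
    | succ f =>
      simp only [Nat.toDigits, Nat.toDigitsCore]
      by_cases hx : n / b = 0
      · simp [hx]
      · simp only [hx, if_false]
        have hn0 : n ≠ 0 := fun h => hx (by simp [h])
        have hdiv : n / b < n := Nat.div_lt_self (by omega) (by omega)
        rw [toDigitsCore_shift, toDigitsCore_shift b n,
          ih (n / b) hdiv f (by omega),
          ih (n / b) hdiv n hdiv]

lemma toDigits_step (m : Nat) (hm : 10 ≤ m) :
    Nat.toDigits 10 m = Nat.toDigits 10 (m / 10) ++ [Nat.digitChar (m % 10)] := by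
  have hx : m / 10 ≠ 0 := by omega
  have hdiv : m / 10 < m := Nat.div_lt_self (by omega) (by omega)
  conv_lhs => rw [Nat.toDigits]
  simp only [Nat.toDigitsCore, hx, if_false]
  rw [toDigitsCore_shift, toDigitsCore_fuel 10 (by norm_num) (m / 10) m hdiv]

lemma toDigits_small (m : Nat) (hm : m < 10) : Nat.toDigits 10 m = [Nat.digitChar m] := by
  interval_cases m <;> decide

lemma digitChar_val (d : Nat) (hd : d < 10) : ((Nat.digitChar d).toNat : Int) - 48 = (d : Int) := by
  interval_cases d <;> decide

lemma dlist_nonneg (n : Int) (hn : 0 ≤ n) :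
    dlist n = (Nat.toDigits 10 n.toNat).map (fun c => ((c.toNat : Int) - 48)) := by
  simp [dlist, PySem.Int.toChars, Int.not_lt.mpr hn]

lemma dlist_small (m : Nat) (hm : m < 10) : dlist (m : Int) = [(m : Int)] := by
  rw [dlist_nonneg _ (by positivity), Int.toNat_natCast, toDigits_small m hm]
  simp [digitChar_val m hm]

lemma dlist_step (m : Nat) (hm : 10 ≤ m) :
    dlist (m : Int) = dlist ((m / 10 : Nat) : Int) ++ [((m % 10 : Nat) : Int)] := by
  rw [dlist_nonneg _ (by positivity), dlist_nonneg _ (by positivity),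
    Int.toNat_natCast, Int.toNat_natCast, toDigits_step m hm]
  simp [digitChar_val (m % 10) (Nat.mod_lt m (by omega))]

lemma dlist_ne_nil (m : Nat) : dlist (m : Int) ≠ [] := by
  by_cases hm : m < 10
  · rw [dlist_small m hm]; simp
  · rw [dlist_step m (by omega)]; simp

lemma dlist_getLast? (m : Nat) : (dlist (m : Int)).getLast? = some ((m % 10 : Nat) : Int) := by
  by_cases hm : m < 10
  · rw [dlist_small m hm, Nat.mod_eq_of_lt hm]
    rfl
  · rw [dlist_step m (by omega), List.getLast?_concat]

lemma pairSum_append (l : List Int) (x y : Int) (h : l.getLast? = some y) :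
    pairSum (l ++ [x]) = pairSum l + (x - y - 1) + (if x = y then 1 else 0) := by
  induction l with
  | nil => simp at h
  | cons a t ih =>
    cases t with
    | nil =>
      simp only [List.getLast?_singleton, Option.some.injEq] at h
      subst h
      show (x - a - 1) + (if x = a then 1 else 0) + 0 = 0 + (x - a - 1) + (if x = a then 1 else 0)
      ring
    | cons b t' =>
      rw [List.getLast?_cons_cons] at h
      have e1 : pairSum ((a :: b :: t') ++ [x]) =
          (b - a - 1) + (if b = a then 1 else 0) + pairSum ((b :: t') ++ [x]) := rfl
      have e2 : pairSum (a :: b :: t') =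
          (b - a - 1) + (if b = a then 1 else 0) + pairSum (b :: t') := rfl
      rw [e1, ih h, e2]
      ring

-- A computes pairSum of the digit list (nonnegative inputs)
lemma A_eq_pairSum (m : Nat) : missing_digits (m : Int) = pairSum (dlist (m : Int)) := by
  induction m using Nat.strong_induction_on with
  | _ m ih =>
    by_cases hm : m < 10
    · rw [missing_digits, if_pos (by exact_mod_cast hm), dlist_small m hm]
      rfl
    · have hm' : 10 ≤ m := by omega
      have hfd : PySem.Int.floordiv (m : Int) 10 = ((m / 10 : Nat) : Int) := by
        exact_mod_cast PySem.Int.floordiv_natCast m 10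
      have hmd : PySem.Int.mod (m : Int) 10 = ((m % 10 : Nat) : Int) := by
        exact_mod_cast PySem.Int.mod_natCast m 10
      have hmd2 : PySem.Int.mod ((m / 10 : Nat) : Int) 10 = ((m / 10 % 10 : Nat) : Int) := by
        exact_mod_cast PySem.Int.mod_natCast (m / 10) 10
      have hdiv : m / 10 < m := Nat.div_lt_self (by omega) (by omega)
      have hrec := ih (m / 10) hdiv
      rw [missing_digits, if_neg (by omega), dlist_step m hm',
        pairSum_append _ _ _ (dlist_getLast? (m / 10)), ← hrec]
      simp only [hfd, hmd, hmd2, Bool.or_eq_true, beq_iff_eq]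
      generalize missing_digits ((m / 10 : Nat) : Int) = R
      split_ifs <;> omega

-- B's closed form equals pairSum on any nonempty digit list
lemma B_closed_form (ds : List Int) (h : ds ≠ []) :
    (PySem.List.pyGetD ds (-1) 0 - PySem.List.pyGetD ds 0 0) - (PySem.List.len ds - 1) +
      ((ds.zip ds.tail).foldl (fun acc p => if p.1 == p.2 then acc + 1 else acc) 0)
    = pairSum ds := by
  induction ds with
  | nil => exact absurd rfl h
  | cons a t ih =>
    cases t with
    | nil =>
      rw [PySem.List.pyGetD_neg_one [a] 0 h]
      simp [pairSum, PySem.List.pyGetD_zero_cons]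
    | cons b t' =>
      have hne : (b :: t') ≠ [] := by simp
      have hlast : PySem.List.pyGetD (a :: b :: t') (-1) 0 = PySem.List.pyGetD (b :: t') (-1) 0 := by
        rw [PySem.List.pyGetD_neg_one _ 0 h, PySem.List.pyGetD_neg_one _ 0 hne,
          List.getLast_cons hne]
      have hzip : (a :: b :: t').zip (a :: b :: t').tail = (a, b) :: (b :: t').zip t' := by
        simp [List.zip]
      have expand : ∀ (l : List (Int × Int)) (init : Int),
          l.foldl (fun acc p => if p.1 == p.2 then acc + 1 else acc) init =
          init + (List.countP (fun p : Int × Int => p.1 == p.2) l : Int) :=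
        fun l init => PySem.List.foldl_count_if (fun p : Int × Int => p.1 == p.2) l init
      have htail : (b :: t').tail = t' := rfl
      have step : pairSum (a :: b :: t') =
          (b - a - 1) + (if b = a then 1 else 0) + pairSum (b :: t') := rfl
      rw [hzip, expand, List.countP_cons, step, ← ih hne, expand, htail, hlast]
      simp only [PySem.List.pyGetD_zero_cons, PySem.List.len_eq, List.length_cons]
      by_cases hab : a = b
      · simp [hab]
        ring
      · have h1 : ((a, b).1 == (a, b).2) = false := by simp [hab]
        simp only [h1, Bool.false_eq_true, if_false, Nat.add_zero]
        rw [if_neg (show ¬ b = a from fun hba => hab hba.symm)]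
        push_cast
        ring

-- ===== VERDICT (by name: the statement is the Claim_ definition above) =====
theorem missing_digits_spec : Claim_equal_missing_digits := by
  intro n _
  unfold Spec_missing_digits
  by_cases hn : n < 10
  · rw [missing_digits, if_pos hn, missing_digits_alt, if_pos hn]
  · rw [missing_digits_alt, if_neg hn]
    have hm : n = ((n.toNat : Nat) : Int) := by omega
    rw [hm]
    show missing_digits ((n.toNat : Nat) : Int) =
      (PySem.List.pyGetD (dlist ((n.toNat : Nat) : Int)) (-1) 0 -
        PySem.List.pyGetD (dlist ((n.toNat : Nat) : Int)) 0 0) -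
        (PySem.List.len (dlist ((n.toNat : Nat) : Int)) - 1) +
      ((dlist ((n.toNat : Nat) : Int)).zip
          (PySem.List.slice (dlist ((n.toNat : Nat) : Int)) (some 1) none)).foldl
        (fun acc p => if p.1 == p.2 then acc + 1 else acc) 0
    rw [PySem.List.slice_from_one, B_closed_form _ (dlist_ne_nil n.toNat),
      A_eq_pairSum n.toNat]
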